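-- pv_equiv track=rewrite | github.com/YOONLEEVERSE/REAL-algorithm | yjh/2025/01/31/solution4.py | find_matching_words
-- ===== SOURCE A (Python) =====
-- def find_matching_words(words, pattern):
--     matching_words = []
--     for i, word in enumerate(words):
--         if len(word) != len(pattern):
--             continue
--         skip = False
--         for j, p in enumerate(pattern):
--             if not (p == "*" or p == word[j]):
--                 skip = True
--                 break
--         if not skip:
--             matching_words.append(i)
--     return matching_words
-- ===== SOURCE B (Python) =====
-- def find_matching_words(words, pattern):
--     # precompute the wildcard positions once, then canonicalize each word by
--     # masking those positions and compare whole strings for equality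
--     stars = {j for j, p in enumerate(pattern) if p == "*"}
--     n = len(pattern)
--     return [i for i, w in enumerate(words)
--             if len(w) == n
--             and "".join("*" if j in stars else c for j, c in enumerate(w)) == pattern]
-- ===== Notes on version B (the rewrite author's own statement) =====
-- stated objective: alternative
-- what changed: Instead of an index loop with a skip flag and early break per word, B precomputes the set of wildcard positions once, canonicalizes each word by masking those positions and compares whole strings, collecting indices with a comprehension.
import Mathlib
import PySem

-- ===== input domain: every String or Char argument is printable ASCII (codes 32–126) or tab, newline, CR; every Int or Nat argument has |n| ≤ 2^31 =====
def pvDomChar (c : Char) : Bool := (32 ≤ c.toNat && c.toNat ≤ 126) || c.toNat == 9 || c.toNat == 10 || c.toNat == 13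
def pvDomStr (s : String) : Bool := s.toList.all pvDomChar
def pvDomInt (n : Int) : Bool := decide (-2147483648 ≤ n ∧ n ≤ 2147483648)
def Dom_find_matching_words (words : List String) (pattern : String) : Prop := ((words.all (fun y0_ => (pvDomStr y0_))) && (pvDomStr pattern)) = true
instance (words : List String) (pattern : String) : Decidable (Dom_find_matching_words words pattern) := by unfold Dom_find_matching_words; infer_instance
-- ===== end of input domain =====

-- B canonicalizes each word by masking the precomputed wildcard positions and compares whole
-- strings, instead of A's indexed scan with a skip flag; same cost, different decomposition.

-- ===== PORT A =====
-- inner loop: 'for j, p in enumerate(pattern): if not (p == "*" or p == word[j]): skip = True; break'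
-- word[j] is ported with pyGet?; the 'none' branch is unreachable (A only runs this loop when
-- len(word) == len(pattern)), a mismatch there is never observed.
def aScan (w : List Char) (j : Nat) : List Char → Bool
  | [] => false
  | p :: ps =>
    if !(p == '*' || (PySem.List.pyGet? w (j : Int)).any (fun c => p == c)) then true
    else aScan w (j + 1) ps

def find_matching_words (words : List String) (pattern : String) : List Int :=
  (PySem.List.enumerate words).foldl
    (fun acc iw =>
      if PySem.Str.len iw.2 ≠ PySem.Str.len pattern then acc
      else
        let skip := aScan iw.2.toList 0 pattern.toList
        if !skip then acc ++ [iw.1] else acc)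
    []

-- ===== PORT B =====
-- stars = {j for j, p in enumerate(pattern) if p == "*"}
def bStars (pl : List Char) : PySem.Set Int :=
  PySem.Set.ofList ((PySem.List.enumerate pl).filterMap
    (fun jp => if jp.2 == '*' then some jp.1 else none))

-- "".join("*" if j in stars else c for j, c in enumerate(w))
def bMask (stars : PySem.Set Int) (wl : List Char) : List Char :=
  (PySem.List.enumerate wl).map (fun jc => if PySem.Set.contains stars jc.1 then '*' else jc.2)

def find_matching_words_alt (words : List String) (pattern : String) : List Int :=
  let stars := bStars pattern.toList
  let n := PySem.Str.len pattern
  ((PySem.List.enumerate words).filter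
    (fun iw => PySem.Str.len iw.2 == n && bMask stars iw.2.toList == pattern.toList)).map (·.1)

-- ===== PRECONDITION & SPEC =====
def Spec_find_matching_words (words : List String) (pattern : String) (out : List Int) : Prop := out = find_matching_words_alt words pattern
instance (words : List String) (pattern : String) (out : List Int) : Decidable (Spec_find_matching_words words pattern out) := by unfold Spec_find_matching_words; infer_instance

-- ===== CLAIM (what is proved, stated in full; the proofs are below) =====
def Claim_equal_find_matching_words : Prop := ∀ (words : List String) (pattern : String), Dom_find_matching_words words pattern → Spec_find_matching_words words pattern (find_matching_words words pattern)

-- ===== LEMMAS AND PROOFS =====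

lemma mem_bStars (pl : List Char) (j : Int) :
    j ∈ bStars pl ↔ ∃ k : Nat, k < pl.length ∧ j = (k : Int) ∧ pl[k]! = '*' := by
  unfold bStars
  simp only [PySem.Set.mem_ofList, List.mem_filterMap, PySem.List.mem_enumerate_iff]
  constructor
  · rintro ⟨p, ⟨k, hk, rfl⟩, hif⟩
    simp only [zero_add] at hif
    by_cases hs : pl[k] = '*'
    · refine ⟨k, hk, ?_, by simp [hk, hs]⟩
      simp [hs] at hif
      omega
    · simp [hs] at hif
  · rintro ⟨k, hk, rfl, hstar⟩
    refine ⟨((k : Int), pl[k]), ⟨k, hk, by simp⟩, ?_⟩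
    simp [hk] at hstar
    simp [hstar]

lemma aScan_eq_false_iff (pl : List Char) : ∀ (wpre wsuf : List Char),
    pl.length = wsuf.length →
    (aScan (wpre ++ wsuf) wpre.length pl = false ↔
      ∀ k : Nat, (h : k < pl.length) → pl[k] = '*' ∨ pl[k] = wsuf[k]!) := by
  induction pl with
  | nil => intro wpre wsuf _; simp [aScan]
  | cons p ps ih =>
    intro wpre wsuf hlen
    cases wsuf with
    | nil => simp at hlen
    | cons c ws =>
      simp only [List.length_cons] at hlen
      have hget : PySem.List.pyGet? (wpre ++ c :: ws) (wpre.length : Int) = some c :=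
        PySem.List.pyGet?_append_length wpre ws c
      by_cases hc : p = '*' ∨ p = c
      · have hstep : aScan (wpre ++ c :: ws) wpre.length (p :: ps)
            = aScan (wpre ++ c :: ws) (wpre.length + 1) ps := by
          simp only [aScan, hget]
          rcases hc with h | h <;> simp [h]
        have hre : wpre ++ c :: ws = (wpre ++ [c]) ++ ws := by simp
        have hlen' : (wpre ++ [c]).length = wpre.length + 1 := by simp
        rw [hstep, hre, ← hlen', ih (wpre ++ [c]) ws (by omega)]
        constructor
        · intro hall k hk
          match k with
          | 0 => simpa using hc
          | k + 1 =>
            have hk' : k < ps.length := by simpa using hk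
            have := hall k hk'
            simpa using this
        · intro hall k hk
          have := hall (k + 1) (by simp; omega)
          simpa using this
      · have hstep : aScan (wpre ++ c :: ws) wpre.length (p :: ps) = true := by
          rw [not_or] at hc
          simp [aScan, hc.1, hc.2]
        rw [hstep]
        constructor
        · intro h; exact absurd h (by simp)
        · intro hall
          have := hall 0 (by simp)
          simp at this
          exact absurd this hc

lemma bMask_getElem (pl wl : List Char) (k : Nat) (hk : k < wl.length) :
    (bMask (bStars pl) wl)[k]'(by simp [bMask, PySem.List.length_enumerate]; omega) =
      if (k < pl.length ∧ pl[k]! = '*') then '*' else wl[k] := by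
  have h1 : (bMask (bStars pl) wl)[k]'(by simp [bMask, PySem.List.length_enumerate]; omega)
      = (fun jc : Int × Char => if PySem.Set.contains (bStars pl) jc.1 then '*' else jc.2)
          ((PySem.List.enumerate wl)[k]'(by simp [PySem.List.length_enumerate]; omega)) := by
    simp [bMask]
  rw [h1, PySem.List.getElem_enumerate]
  simp only [zero_add]
  by_cases hs : (k : Int) ∈ bStars pl
  · obtain ⟨m, hm, hkm, hstar⟩ := (mem_bStars pl (k : Int)).1 hs
    have hmk : m = k := by omega
    subst hmk
    rw [if_pos ((PySem.Set.contains_iff _ _).2 hs), if_pos ⟨hm, hstar⟩]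
  · have hcon : PySem.Set.contains (bStars pl) (k : Int) = false := by
      by_contra h
      exact hs ((PySem.Set.contains_iff _ _).1 (by simpa using h))
    rw [hcon, if_neg (by simp), if_neg]
    rintro ⟨h1', h2'⟩
    exact hs ((mem_bStars pl (k : Int)).2 ⟨k, h1', rfl, h2'⟩)

lemma bMask_eq_iff (pl wl : List Char) :
    (bMask (bStars pl) wl = pl ↔
      wl.length = pl.length ∧ ∀ k : Nat, (h : k < pl.length) → pl[k] = '*' ∨ pl[k] = wl[k]!) := by
  have hlenmask : (bMask (bStars pl) wl).length = wl.length := by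
    simp [bMask, PySem.List.length_enumerate]
  constructor
  · intro heq
    have hlen : wl.length = pl.length := by rw [← hlenmask, heq]
    refine ⟨hlen, ?_⟩
    intro k hk
    have hk' : k < wl.length := by omega
    have h2 := bMask_getElem pl wl k hk'
    simp only [heq] at h2
    by_cases hs : pl[k]! = '*'
    · left; rw [getElem!_pos pl k hk] at hs; exact hs
    · right
      rw [if_neg (by tauto)] at h2
      rw [h2, getElem!_pos wl k hk']
  · rintro ⟨hlen, hall⟩
    apply List.ext_getElem (by omega)
    intro k h1 h2
    have hk' : k < wl.length := by omega
    rw [bMask_getElem pl wl k hk']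
    rcases hall k h2 with h | h
    · rw [if_pos ⟨h2, by rw [getElem!_pos pl k h2]; exact h⟩, h]
    · rw [getElem!_pos wl k hk'] at h
      by_cases hs : pl[k] = '*'
      · rw [if_pos ⟨h2, by rw [getElem!_pos pl k h2]; exact hs⟩, hs]
      · rw [if_neg (by rw [getElem!_pos pl k h2]; tauto), h]

lemma body_eq (pattern w : String) (acc : List Int) (i : Int) :
    (if PySem.Str.len w ≠ PySem.Str.len pattern then acc
     else if !(aScan w.toList 0 pattern.toList) then acc ++ [i] else acc)
    = (if (PySem.Str.len w == PySem.Str.len pattern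
            && bMask (bStars pattern.toList) w.toList == pattern.toList)
       then acc ++ [i] else acc) := by
  by_cases hl : PySem.Str.len w = PySem.Str.len pattern
  · have hlen : w.toList.length = pattern.toList.length := by
      simp only [PySem.Str.len_eq] at hl; exact_mod_cast hl
    have hsl : w.length = pattern.length := by
      rw [← String.length_toList, ← String.length_toList]; exact hlen
    rw [if_neg (by simp [hsl])]
    have hscan := aScan_eq_false_iff pattern.toList [] w.toList (by omega)
    simp only [List.nil_append, List.length_nil] at hscan
    have hmask := bMask_eq_iff pattern.toList w.toList
    by_cases hP : ∀ k : Nat, (h : k < pattern.toList.length) →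
        pattern.toList[k] = '*' ∨ pattern.toList[k] = w.toList[k]!
    · rw [hscan.2 hP]
      have hm : bMask (bStars pattern.toList) w.toList = pattern.toList := hmask.2 ⟨hlen, hP⟩
      simp [hsl, hm]
    · have ha : aScan w.toList 0 pattern.toList = true := by
        cases h : aScan w.toList 0 pattern.toList
        · exact absurd (hscan.1 h) hP
        · rfl
      have hb : bMask (bStars pattern.toList) w.toList ≠ pattern.toList :=
        fun hc => hP (hmask.1 hc).2
      simp [ha, hb, hsl]
  · have hsl : ¬ (w.length = pattern.length) := by
      intro h; apply hl
      simp only [PySem.Str.len_eq, ← String.length_toList] at *; exact_mod_cast h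
    simp [hsl]

-- ===== VERDICT (by name: the statement is the Claim_ definition above) =====
theorem find_matching_words_spec : Claim_equal_find_matching_words := by
  intro words pattern _
  unfold Spec_find_matching_words find_matching_words find_matching_words_alt
  have h1 : (PySem.List.enumerate words).foldl
      (fun acc iw =>
        if PySem.Str.len iw.2 ≠ PySem.Str.len pattern then acc
        else
          let skip := aScan iw.2.toList 0 pattern.toList
          if !skip then acc ++ [iw.1] else acc) []
    = (PySem.List.enumerate words).foldl
      (fun acc iw =>
        if (PySem.Str.len iw.2 == PySem.Str.len pattern
            && bMask (bStars pattern.toList) iw.2.toList == pattern.toList)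
        then acc ++ [iw.1] else acc) [] :=
    by exact PySem.List.foldl_congr_mem _ _ _ _ (fun acc (iw : Int × String) _ => body_eq pattern iw.2 acc iw.1)
  rw [h1, PySem.List.foldl_append_if]
  simp
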